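-- pv_equiv track=rewrite | github.com/hoangvt-152/coding-interview-university | cracking_coding_interview/chapter10/searchandsorting.py | closest_not_empty_string_index
-- ===== SOURCE A (Python) =====
-- def closest_not_empty_string_index(current_index,array):
--     if array[current_index] !="":
--         return current_index,current_index
--     left   = -1
--     right = -1
--     for i in range(1,current_index+1):
--         if array[current_index-i] !="":
--             left = current_index -i
--             break
--     for i in range(1,len(array) -current_index+1-1):
--         if array[current_index+i] !="":
--             right = current_index +i
--             break
--     return left,right
-- ===== SOURCE B (Python) =====
-- def closest_not_empty_string_index(current_index, array):
--     if array[current_index] != "":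
--         return current_index, current_index
--     n = len(array)
--     left = -1
--     right = -1
--     for r in range(1, max(current_index, n - current_index - 1) + 1):
--         if left == -1 and r <= current_index and array[current_index - r] != "":
--             left = current_index - r
--         if right == -1 and current_index + r < n and array[current_index + r] != "":
--             right = current_index + r
--     return left, right
-- ===== Notes on version B (the rewrite author's own statement) =====
-- stated objective: alternative
-- what changed: Replaces A's two sequential directional scans (left loop with break, then right loop with break) by a single interleaved loop over the outward radius r that maintains both left and right simultaneously and freezes each once found.
-- outside the precondition, e.g. on closest_not_empty_string_index(-3, ['y', '', '', 'x']): A returns (-1, -1), B returns (-1, 0)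
import Mathlib
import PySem

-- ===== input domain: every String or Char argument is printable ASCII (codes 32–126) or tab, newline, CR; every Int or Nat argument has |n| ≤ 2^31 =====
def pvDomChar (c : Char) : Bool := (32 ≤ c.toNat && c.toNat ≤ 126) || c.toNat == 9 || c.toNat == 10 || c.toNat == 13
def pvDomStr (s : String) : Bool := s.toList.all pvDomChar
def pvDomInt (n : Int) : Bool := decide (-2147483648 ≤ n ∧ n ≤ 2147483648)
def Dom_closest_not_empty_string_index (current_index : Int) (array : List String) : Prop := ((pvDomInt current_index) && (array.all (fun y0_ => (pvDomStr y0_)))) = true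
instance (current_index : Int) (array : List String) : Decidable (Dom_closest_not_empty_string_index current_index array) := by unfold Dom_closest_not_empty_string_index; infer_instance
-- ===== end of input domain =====

-- B replaces A's two sequential directional scans by one interleaved loop over the
-- outward radius maintaining both answers at once (alternative decomposition, same cost).


-- ===== PORT A =====
-- first 'for i in range(...)' loop of A: scan offsets i, break at the first non-empty
-- array[current_index - i]; -1 if none
def aScanL (array : List String) (ci : Int) : List Int → Int
  | [] => -1
  | i :: rest =>
    if ((PySem.List.pyGet? array (ci - i)).getD "") ≠ "" then ci - i
    else aScanL array ci rest

-- second loop of A: break at the first non-empty array[current_index + i]; -1 if none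
def aScanR (array : List String) (ci : Int) : List Int → Int
  | [] => -1
  | i :: rest =>
    if ((PySem.List.pyGet? array (ci + i)).getD "") ≠ "" then ci + i
    else aScanR array ci rest

def closest_not_empty_string_index (current_index : Int) (array : List String) : Int × Int :=
  if ((PySem.List.pyGet? array current_index).getD "") ≠ "" then
    (current_index, current_index)
  else
    (aScanL array current_index (PySem.List.pyRange 1 (current_index + 1) 1),
     aScanR array current_index (PySem.List.pyRange 1 ((array.length : Int) - current_index + 1 - 1) 1))

-- ===== PORT B =====
-- body of B's single radius loop: update (left, right) at radius r
def bStep (array : List String) (ci n : Int) (p : Int × Int) (r : Int) : Int × Int :=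
  let l := if p.1 = -1 ∧ r ≤ ci ∧ ((PySem.List.pyGet? array (ci - r)).getD "") ≠ "" then ci - r else p.1
  let rt := if p.2 = -1 ∧ ci + r < n ∧ ((PySem.List.pyGet? array (ci + r)).getD "") ≠ "" then ci + r else p.2
  (l, rt)

def closest_not_empty_string_index_alt (current_index : Int) (array : List String) : Int × Int :=
  if ((PySem.List.pyGet? array current_index).getD "") ≠ "" then
    (current_index, current_index)
  else
    let n : Int := array.length
    (PySem.List.pyRange 1 (max current_index (n - current_index - 1) + 1) 1).foldl
      (bStep array current_index n) (-1, -1)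

-- ===== PRECONDITION & SPEC =====
-- Pre_ excludes out-of-range current_index (A raises IndexError there) and also negative
-- in-range current_index, where A's behaviour is an artefact of Python's negative-index
-- wraparound: a hit at wrapped index -1 is indistinguishable from A's -1 "not found" sentinel.
def Pre_closest_not_empty_string_index (current_index : Int) (array : List String) : Prop :=
  0 ≤ current_index ∧ current_index < (array.length : Int)
instance (current_index : Int) (array : List String) : Decidable (Pre_closest_not_empty_string_index current_index array) := by unfold Pre_closest_not_empty_string_index; infer_instance

def pvWitness_closest_not_empty_string_index : Int × List String := (2, ["a", "", "", "", "b"])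

def Spec_closest_not_empty_string_index (current_index : Int) (array : List String) (out : Int × Int) : Prop := out = closest_not_empty_string_index_alt current_index array
instance (current_index : Int) (array : List String) (out : Int × Int) : Decidable (Spec_closest_not_empty_string_index current_index array out) := by unfold Spec_closest_not_empty_string_index; infer_instance

-- ===== CLAIM (what is proved, stated in full; the proofs are below) =====
def Claim_equal_closest_not_empty_string_index : Prop := ∀ (current_index : Int) (array : List String), Dom_closest_not_empty_string_index current_index array → Pre_closest_not_empty_string_index current_index array → Spec_closest_not_empty_string_index current_index array (closest_not_empty_string_index current_index array)

-- ===== LEMMAS AND PROOFS =====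

-- the two components of B's fold evolve independently
theorem foldl_bStep_pair (array : List String) (ci n : Int) :
    ∀ (rs : List Int) (l0 r0 : Int),
      rs.foldl (bStep array ci n) (l0, r0) =
        (rs.foldl (fun l r => if l = -1 ∧ r ≤ ci ∧ ((PySem.List.pyGet? array (ci - r)).getD "") ≠ "" then ci - r else l) l0,
         rs.foldl (fun rt r => if rt = -1 ∧ ci + r < n ∧ ((PySem.List.pyGet? array (ci + r)).getD "") ≠ "" then ci + r else rt) r0) := by
  intro rs
  induction rs with
  | nil => intro l0 r0; rfl
  | cons a rest ih =>
    intro l0 r0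
    simp only [List.foldl_cons, bStep]
    exact ih _ _

theorem foldl_left_frozen (array : List String) (ci : Int) :
    ∀ (rs : List Int) (l0 : Int), l0 ≠ -1 →
      rs.foldl (fun l r => if l = -1 ∧ r ≤ ci ∧ ((PySem.List.pyGet? array (ci - r)).getD "") ≠ "" then ci - r else l) l0 = l0 := by
  intro rs
  induction rs with
  | nil => intro l0 _; rfl
  | cons a rest ih =>
    intro l0 h
    simp only [List.foldl_cons]
    rw [if_neg (by tauto)]
    exact ih l0 h

theorem foldl_right_frozen (array : List String) (ci n : Int) :
    ∀ (rs : List Int) (r0 : Int), r0 ≠ -1 →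
      rs.foldl (fun rt r => if rt = -1 ∧ ci + r < n ∧ ((PySem.List.pyGet? array (ci + r)).getD "") ≠ "" then ci + r else rt) r0 = r0 := by
  intro rs
  induction rs with
  | nil => intro r0 _; rfl
  | cons a rest ih =>
    intro r0 h
    simp only [List.foldl_cons]
    rw [if_neg (by tauto)]
    exact ih r0 h

-- radii beyond the left bound are no-ops
theorem foldl_left_tail (array : List String) (ci : Int) :
    ∀ (rs : List Int) (l0 : Int), (∀ r ∈ rs, ¬ r ≤ ci) →
      rs.foldl (fun l r => if l = -1 ∧ r ≤ ci ∧ ((PySem.List.pyGet? array (ci - r)).getD "") ≠ "" then ci - r else l) l0 = l0 := by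
  intro rs
  induction rs with
  | nil => intro l0 _; rfl
  | cons a rest ih =>
    intro l0 h
    simp only [List.foldl_cons]
    rw [if_neg (by have := h a (by simp); tauto)]
    exact ih l0 (fun r hr => h r (by simp [hr]))

-- radii beyond the right bound are no-ops
theorem foldl_right_tail (array : List String) (ci n : Int) :
    ∀ (rs : List Int) (r0 : Int), (∀ r ∈ rs, ¬ ci + r < n) →
      rs.foldl (fun rt r => if rt = -1 ∧ ci + r < n ∧ ((PySem.List.pyGet? array (ci + r)).getD "") ≠ "" then ci + r else rt) r0 = r0 := by
  intro rs
  induction rs with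
  | nil => intro r0 _; rfl
  | cons a rest ih =>
    intro r0 h
    simp only [List.foldl_cons]
    rw [if_neg (by have := h a (by simp); tauto)]
    exact ih r0 (fun r hr => h r (by simp [hr]))

-- on radii within the left bound, B's fold computes A's first-hit scan
theorem foldl_left_eq_scan (array : List String) (ci : Int) :
    ∀ (rs : List Int), (∀ r ∈ rs, r ≤ ci ∧ ci - r ≠ -1) →
      rs.foldl (fun l r => if l = -1 ∧ r ≤ ci ∧ ((PySem.List.pyGet? array (ci - r)).getD "") ≠ "" then ci - r else l) (-1) = aScanL array ci rs := by
  intro rs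
  induction rs with
  | nil => intro _; rfl
  | cons a rest ih =>
    intro h
    obtain ⟨ha, hne⟩ := h a (by simp)
    simp only [List.foldl_cons, aScanL]
    by_cases hp : ((PySem.List.pyGet? array (ci - a)).getD "") ≠ ""
    · rw [if_pos ⟨by simp, ha, hp⟩, if_pos hp]
      exact foldl_left_frozen array ci rest (ci - a) hne
    · rw [if_neg (by tauto), if_neg hp]
      exact ih (fun r hr => h r (by simp [hr]))

-- on radii within the right bound, B's fold computes A's first-hit scan
theorem foldl_right_eq_scan (array : List String) (ci n : Int) :
    ∀ (rs : List Int), (∀ r ∈ rs, ci + r < n ∧ ci + r ≠ -1) →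
      rs.foldl (fun rt r => if rt = -1 ∧ ci + r < n ∧ ((PySem.List.pyGet? array (ci + r)).getD "") ≠ "" then ci + r else rt) (-1) = aScanR array ci rs := by
  intro rs
  induction rs with
  | nil => intro _; rfl
  | cons a rest ih =>
    intro h
    obtain ⟨ha, hne⟩ := h a (by simp)
    simp only [List.foldl_cons, aScanR]
    by_cases hp : ((PySem.List.pyGet? array (ci + a)).getD "") ≠ ""
    · rw [if_pos ⟨by simp, ha, hp⟩, if_pos hp]
      exact foldl_right_frozen array ci n rest (ci + a) hne
    · rw [if_neg (by tauto), if_neg hp]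
      exact ih (fun r hr => h r (by simp [hr]))

-- ===== VERDICT (by name: the statement is the Claim_ definition above) =====
theorem closest_not_empty_string_index_spec : Claim_equal_closest_not_empty_string_index := by
  intro ci array _ hpre
  obtain ⟨h0, hlt⟩ := hpre
  unfold Spec_closest_not_empty_string_index
  unfold closest_not_empty_string_index closest_not_empty_string_index_alt
  by_cases hc : ((PySem.List.pyGet? array ci).getD "") ≠ ""
  · rw [if_pos hc, if_pos hc]
  · rw [if_neg hc, if_neg hc]
    set n : Int := (array.length : Int) with hn
    have hM1 : ci ≤ max ci (n - ci - 1) + 1 := by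
      have := le_max_left ci (n - ci - 1); omega
    have hM2 : n - ci ≤ max ci (n - ci - 1) + 1 := by
      have := le_max_right ci (n - ci - 1); omega
    have hsplitL : PySem.List.pyRange 1 (max ci (n - ci - 1) + 1) 1 =
        PySem.List.pyRange 1 (ci + 1) 1 ++ PySem.List.pyRange (ci + 1) (max ci (n - ci - 1) + 1) 1 :=
      PySem.List.pyRange_one_append 1 (ci + 1) (max ci (n - ci - 1) + 1) (by omega) (by omega)
    have hsplitR : PySem.List.pyRange 1 (max ci (n - ci - 1) + 1) 1 =
        PySem.List.pyRange 1 (n - ci) 1 ++ PySem.List.pyRange (n - ci) (max ci (n - ci - 1) + 1) 1 :=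
      PySem.List.pyRange_one_append 1 (n - ci) (max ci (n - ci - 1) + 1) (by omega) (by omega)
    rw [foldl_bStep_pair]
    have hL : (PySem.List.pyRange 1 (max ci (n - ci - 1) + 1) 1).foldl
        (fun l r => if l = -1 ∧ r ≤ ci ∧ ((PySem.List.pyGet? array (ci - r)).getD "") ≠ "" then ci - r else l) (-1)
        = aScanL array ci (PySem.List.pyRange 1 (ci + 1) 1) := by
      rw [hsplitL, List.foldl_append]
      rw [foldl_left_eq_scan array ci _ (by
        intro r hr
        rw [PySem.List.mem_pyRange_one] at hr
        omega)]
      by_cases hfnd : aScanL array ci (PySem.List.pyRange 1 (ci + 1) 1) = -1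
      · rw [hfnd]
        exact foldl_left_tail array ci _ _ (by
          intro r hr
          rw [PySem.List.mem_pyRange_one] at hr
          omega)
      · exact foldl_left_frozen array ci _ _ hfnd
    have hR : (PySem.List.pyRange 1 (max ci (n - ci - 1) + 1) 1).foldl
        (fun rt r => if rt = -1 ∧ ci + r < n ∧ ((PySem.List.pyGet? array (ci + r)).getD "") ≠ "" then ci + r else rt) (-1)
        = aScanR array ci (PySem.List.pyRange 1 (n - ci) 1) := by
      rw [hsplitR, List.foldl_append]
      rw [foldl_right_eq_scan array ci n _ (by
        intro r hr
        rw [PySem.List.mem_pyRange_one] at hr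
        omega)]
      by_cases hfnd : aScanR array ci (PySem.List.pyRange 1 (n - ci) 1) = -1
      · rw [hfnd]
        exact foldl_right_tail array ci n _ _ (by
          intro r hr
          rw [PySem.List.mem_pyRange_one] at hr
          omega)
      · exact foldl_right_frozen array ci n _ _ hfnd
    have hrange : n - ci + 1 - 1 = n - ci := by omega
    rw [hrange, hL, hR]
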